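-- pv_equiv track=rewrite | github.com/jbgour/algorithmes | concours2/wheel_improved/factorize.py | get_non_multiples
-- ===== SOURCE A (Python) =====
-- def get_non_multiples(n, max_divisor):
--     """
--     return all  non multiples of base_list untill n.
--     :param n: int
--     :return: list of divisors
--     """
--     non_multiple = []
--     is_multiple = [False] * (n + 1)
--     for i in range(2, max_divisor + 1):
--         is_multiple[::i] = [True] * ((n // i) + 1)
--     for i in range(2, n + 1):
--         if not is_multiple[i]:
--             non_multiple.append(i)
--     del is_multiple
--     return non_multiple
-- ===== SOURCE B (Python) =====
-- def get_non_multiples(n, max_divisor):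
--     """Numbers 2..n having no divisor in [2, max_divisor]: per-number trial
--     division with early exit (no marking table at all).  k has a divisor in
--     [2, max_divisor] iff its least prime factor is <= max_divisor, which a
--     scan of candidate divisors d with d <= max_divisor and d*d <= k detects,
--     except when k itself is <= max_divisor (k divides k)."""
--     out = []
--     for k in range(2, n + 1):
--         d = 2
--         while d <= max_divisor and d * d <= k:
--             if k % d == 0:
--                 break
--             d += 1
--         else:
--             if k > max_divisor:
--                 out.append(k)
--     return out
-- ===== Notes on version B (the rewrite author's own statement) =====
-- stated objective: alternative
-- what changed: A builds a boolean marking table by slice-assigning the multiples of every i in [2, max_divisor] and then scans it; B keeps no table at all and instead tests each k in [2, n] individually by trial division with early exit (divisors d with d <= max_divisor and d*d <= k, plus the k <= max_divisor self-divisor case), relying on the least-prime-factor characterisation.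
import Mathlib
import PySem

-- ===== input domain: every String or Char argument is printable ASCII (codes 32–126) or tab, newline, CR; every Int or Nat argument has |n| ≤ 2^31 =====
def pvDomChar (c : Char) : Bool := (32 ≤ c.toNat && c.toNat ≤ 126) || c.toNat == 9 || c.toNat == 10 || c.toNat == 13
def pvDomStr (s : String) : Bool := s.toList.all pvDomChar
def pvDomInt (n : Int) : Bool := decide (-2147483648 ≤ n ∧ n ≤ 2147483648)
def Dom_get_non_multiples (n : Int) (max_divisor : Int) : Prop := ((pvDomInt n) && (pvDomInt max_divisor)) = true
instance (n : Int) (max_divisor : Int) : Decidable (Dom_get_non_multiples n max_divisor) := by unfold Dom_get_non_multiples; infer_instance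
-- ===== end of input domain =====

-- B replaces A's marking table (slice-assign the multiples of every i ≤ max_divisor, then
-- scan it) by per-number trial division with early exit; alternative algorithm, not timed faster.

-- ===== PORT A =====
-- is_multiple[::i] = [True] * ((n // i) + 1): the replacement length (n//i)+1 always equals
-- the extended-slice length ceil((n+1)/i), so the assignment never raises; its effect is
-- exactly: set every index j with j % i == 0 to True (exact; i ≥ 2 here, so i.toNat = i).
def pvSliceAssignTrueA (im : List Bool) (i : Int) : List Bool :=
  im.mapIdx (fun j b => if j % i.toNat = 0 then true else b)

-- the first loop of A: is_multiple after 'for i in range(2, max_divisor + 1): ...'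
def pvSieveA (n : Int) (max_divisor : Int) : List Bool :=
  (PySem.List.pyRange 2 (max_divisor + 1) 1).foldl pvSliceAssignTrueA
    (List.replicate (n + 1).toNat false)

def get_non_multiples (n : Int) (max_divisor : Int) : List Int :=
  (PySem.List.pyRange 2 (n + 1) 1).foldl
    (fun acc i =>
      if !(PySem.List.pyGetD (pvSieveA n max_divisor) i false) then acc ++ [i] else acc) []

-- ===== PORT B =====
-- the while loop 'while d <= max_divisor and d * d <= k: if k % d == 0: break; d += 1';
-- returns true iff the loop completed without break (Python's while-else)
def pvTrial (max_divisor k d : Int) : Bool :=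
  if d ≤ max_divisor ∧ d * d ≤ k then
    (if PySem.Int.mod k d = 0 then false else pvTrial max_divisor k (d + 1))
  else true
termination_by (max_divisor + 1 - d).toNat
decreasing_by omega

def get_non_multiples_alt (n : Int) (max_divisor : Int) : List Int :=
  (PySem.List.pyRange 2 (n + 1) 1).foldl
    (fun out k =>
      if pvTrial max_divisor k 2 then
        (if max_divisor < k then out ++ [k] else out)
      else out) []

-- ===== PRECONDITION & SPEC =====
def Spec_get_non_multiples (n : Int) (max_divisor : Int) (out : List Int) : Prop := out = get_non_multiples_alt n max_divisor
instance (n : Int) (max_divisor : Int) (out : List Int) : Decidable (Spec_get_non_multiples n max_divisor out) := by unfold Spec_get_non_multiples; infer_instance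

-- ===== CLAIM (what is proved, stated in full; the proofs are below) =====
def Claim_equal_get_non_multiples : Prop := ∀ (n : Int) (max_divisor : Int), Dom_get_non_multiples n max_divisor → Spec_get_non_multiples n max_divisor (get_non_multiples n max_divisor)

-- ===== LEMMAS AND PROOFS =====

theorem pvMarkA_length (im : List Bool) (i : Int) :
    (pvSliceAssignTrueA im i).length = im.length := by
  simp [pvSliceAssignTrueA]

theorem pvMarkA_getD (im : List Bool) (i : Int) (j : Nat) :
    ((pvSliceAssignTrueA im i).getD j false = true) ↔
      (im.getD j false = true ∨ (j < im.length ∧ j % i.toNat = 0)) := by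
  unfold pvSliceAssignTrueA
  by_cases hj : j < im.length
  · rw [List.getD_eq_getElem _ _ (by simpa using hj), List.getD_eq_getElem _ _ hj,
      List.getElem_mapIdx]
    split_ifs with h <;> simp [h, hj]
  · rw [List.getD_eq_default _ _ (by simpa using Nat.le_of_not_lt hj),
      List.getD_eq_default _ _ (Nat.le_of_not_lt hj)]
    simp [hj]

theorem pvFoldA_getD (L : List Int) (im : List Bool) (j : Nat) :
    ((L.foldl pvSliceAssignTrueA im).getD j false = true) ↔
      (im.getD j false = true ∨ (j < im.length ∧ ∃ i ∈ L, j % i.toNat = 0)) := by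
  induction L generalizing im with
  | nil => simp
  | cons i L ih =>
    rw [List.foldl_cons, ih, pvMarkA_getD, pvMarkA_length]
    constructor
    · rintro ((h | ⟨h1, h2⟩) | ⟨h1, i', hi', h2⟩)
      · exact Or.inl h
      · exact Or.inr ⟨h1, i, by simp, h2⟩
      · exact Or.inr ⟨h1, i', by simp [hi'], h2⟩
    · rintro (h | ⟨h1, i', hi', h2⟩)
      · exact Or.inl (Or.inl h)
      · rcases List.mem_cons.mp hi' with rfl | hi'
        · exact Or.inl (Or.inr ⟨h1, h2⟩)
        · exact Or.inr ⟨h1, i', hi', h2⟩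

-- the value of A's sieve at each index
theorem pvSieveA_getD (n max_divisor : Int) (j : Nat) :
    ((pvSieveA n max_divisor).getD j false = true) ↔
      (j < (n + 1).toNat ∧
        ∃ i ∈ PySem.List.pyRange 2 (max_divisor + 1) 1, j % i.toNat = 0) := by
  unfold pvSieveA
  rw [pvFoldA_getD]
  simp

-- B's while loop completes without break iff no candidate divisor e >= d passes its test
theorem pvTrial_spec (max_divisor k : Int) : ∀ d : Int, 0 ≤ d →
    (pvTrial max_divisor k d = true ↔
      ∀ e : Int, d ≤ e → e ≤ max_divisor → e * e ≤ k → ¬ (e ∣ k)) := by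
  intro d
  induction d using pvTrial.induct max_divisor k with
  | case1 d hcond hmod =>
    intro hd
    rw [pvTrial, if_pos hcond, if_pos hmod]
    simp only [Bool.false_eq_true, false_iff, not_forall]
    exact ⟨d, le_rfl, hcond.1, hcond.2,
      fun hn => hn ((PySem.Int.mod_eq_zero_iff_dvd k d).mp hmod)⟩
  | case2 d hcond hmod ih =>
    intro hd
    rw [pvTrial, if_pos hcond, if_neg hmod, ih (by omega)]
    constructor
    · intro h e he hem hek
      rcases eq_or_lt_of_le he with heq | hlt
      · intro hdvd
        exact hmod ((PySem.Int.mod_eq_zero_iff_dvd k d).mpr (by rw [heq]; exact hdvd))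
      · exact h e (by omega) hem hek
    · intro h e he hem hek
      exact h e (by omega) hem hek
  | case3 d hcond =>
    intro hd
    rw [pvTrial, if_neg hcond]
    simp only [true_iff]
    intro e he hem hek hdvd
    rcases not_and_or.mp hcond with h | h
    · omega
    · have hdd : d * d ≤ e * e := mul_le_mul he he hd (by omega)
      omega

-- the arithmetic core: for 2 ≤ K, K has a divisor in [2, M] iff it has one that is
-- also ≤ √K, or K itself is ≤ M (least-prime-factor argument)
theorem pvKey (K M : Nat) (hK : 2 ≤ K) :
    (∃ i, 2 ≤ i ∧ i ≤ M ∧ i ∣ K) ↔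
      ((∃ d, 2 ≤ d ∧ d ≤ M ∧ d * d ≤ K ∧ d ∣ K) ∨ K ≤ M) := by
  constructor
  · rintro ⟨i, hi2, hiM, hidvd⟩
    have hpdvd : K.minFac ∣ K := K.minFac_dvd
    have hp2 : 2 ≤ K.minFac := (K.minFac_prime (by omega)).two_le
    have hpi : K.minFac ≤ i := Nat.minFac_le_of_dvd hi2 hidvd
    by_cases hsq : K.minFac * K.minFac ≤ K
    · exact Or.inl ⟨K.minFac, hp2, by omega, hsq, hpdvd⟩
    · have hKprime : K.Prime := by
        rw [Nat.prime_def_le_sqrt]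
        refine ⟨hK, fun m hm2 hmsqrt hmdvd => ?_⟩
        have hpm : K.minFac ≤ m := Nat.minFac_le_of_dvd hm2 hmdvd
        have hmm : m * m ≤ K := by nlinarith [Nat.sqrt_le' K]
        exact hsq (le_trans (Nat.mul_le_mul hpm hpm) hmm)
      have : i = K := ((hKprime.eq_one_or_self_of_dvd i hidvd).resolve_left (by omega))
      omega
  · rintro (⟨d, h1, h2, _, h4⟩ | hKM)
    · exact ⟨d, h1, h2, h4⟩
    · exact ⟨K, hK, hKM, dvd_refl K⟩

-- Int→Nat bridge: "some i in [2, max_divisor] divides k" matches B's stopping condition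
theorem pvBridge (max_divisor k : Int) (hk2 : 2 ≤ k) :
    (∃ i : Int, (2 ≤ i ∧ i ≤ max_divisor) ∧ k.toNat % i.toNat = 0) ↔
      ((∃ e : Int, 2 ≤ e ∧ e ≤ max_divisor ∧ e * e ≤ k ∧ e ∣ k) ∨ k ≤ max_divisor) := by
  by_cases hM : max_divisor < 2
  · constructor
    · rintro ⟨i, ⟨h1, h2⟩, -⟩; omega
    · rintro (⟨e, h1, h2, -, -⟩ | h) <;> omega
  · push_neg at hM
    have hKnat : (2:Nat) ≤ k.toNat := by omega
    rw [show (k ≤ max_divisor) ↔ (k.toNat ≤ max_divisor.toNat) from by omega]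
    have lhs : (∃ i : Int, (2 ≤ i ∧ i ≤ max_divisor) ∧ k.toNat % i.toNat = 0) ↔
        (∃ i : Nat, 2 ≤ i ∧ i ≤ max_divisor.toNat ∧ i ∣ k.toNat) := by
      constructor
      · rintro ⟨i, ⟨h1, h2⟩, h3⟩
        exact ⟨i.toNat, by omega, by omega, Nat.dvd_of_mod_eq_zero h3⟩
      · rintro ⟨i, h1, h2, h3⟩
        refine ⟨(i : Int), ⟨by omega, by omega⟩, ?_⟩
        rw [Int.toNat_natCast]
        exact Nat.mod_eq_zero_of_dvd h3
    have rhs : (∃ e : Int, 2 ≤ e ∧ e ≤ max_divisor ∧ e * e ≤ k ∧ e ∣ k) ↔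
        (∃ d : Nat, 2 ≤ d ∧ d ≤ max_divisor.toNat ∧ d * d ≤ k.toNat ∧ d ∣ k.toNat) := by
      constructor
      · rintro ⟨e, h1, h2, h3, h4⟩
        have he : (e.toNat : Int) = e := Int.toNat_of_nonneg (by omega)
        have hk : (k.toNat : Int) = k := Int.toNat_of_nonneg (by omega)
        refine ⟨e.toNat, by omega, by omega, ?_, ?_⟩
        · have : (e.toNat : Int) * (e.toNat : Int) ≤ (k.toNat : Int) := by
            rw [he, hk]; exact h3
          exact_mod_cast this
        · rwa [← Int.natCast_dvd_natCast, he, hk]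
      · rintro ⟨d, h1, h2, h3, h4⟩
        refine ⟨(d : Int), by omega, by omega, ?_, ?_⟩
        · have : ((d * d : Nat) : Int) ≤ ((k.toNat : Nat) : Int) := by exact_mod_cast h3
          push_cast at this; omega
        · have hk : (k.toNat : Int) = k := Int.toNat_of_nonneg (by omega)
          rw [← hk]
          exact_mod_cast h4
    rw [lhs, rhs]
    exact pvKey k.toNat max_divisor.toNat hKnat

-- the two filter predicates agree on every k with 2 ≤ k ≤ n
theorem pvPred_eq (n max_divisor k : Int) (hk2 : 2 ≤ k) (hkn : k ≤ n) :
    (!(PySem.List.pyGetD (pvSieveA n max_divisor) k false)) =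
      (pvTrial max_divisor k 2 && decide (max_divisor < k)) := by
  have hk0 : (0:Int) ≤ k := by omega
  rw [PySem.List.pyGetD_of_nonneg _ _ hk0, Bool.eq_iff_iff]
  simp only [Bool.not_eq_true', Bool.and_eq_true, decide_eq_true_eq]
  rw [show ((pvSieveA n max_divisor).getD k.toNat false = false) ↔
      ¬ ((pvSieveA n max_divisor).getD k.toNat false = true) from by simp]
  rw [pvSieveA_getD, pvTrial_spec max_divisor k 2 (by norm_num)]
  have hKlt : k.toNat < (n + 1).toNat := by omega
  simp only [PySem.List.mem_pyRange_one, hKlt, true_and]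
  rw [show (∃ i : Int, (2 ≤ i ∧ i < max_divisor + 1) ∧ k.toNat % i.toNat = 0) ↔
      (∃ i : Int, (2 ≤ i ∧ i ≤ max_divisor) ∧ k.toNat % i.toNat = 0) from by
    constructor <;> (rintro ⟨i, ⟨h1, h2⟩, h3⟩; exact ⟨i, ⟨h1, by omega⟩, h3⟩)]
  rw [pvBridge max_divisor k hk2]
  push_neg
  constructor
  · rintro ⟨h1, h2⟩
    exact ⟨fun e he2 heM hek => h1 e he2 heM hek, h2⟩
  · rintro ⟨h1, h2⟩
    exact ⟨fun e he2 heM hek => h1 e he2 heM hek, h2⟩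

-- nested ifs in B's fold step collapse to a single guarded append
theorem pvStepB_eq (max_divisor : Int) :
    (fun (out : List Int) (k : Int) =>
        if pvTrial max_divisor k 2 then
          (if max_divisor < k then out ++ [k] else out)
        else out) =
      (fun (out : List Int) (k : Int) =>
        if (pvTrial max_divisor k 2 && decide (max_divisor < k)) = true then out ++ [k] else out) := by
  funext out k
  by_cases h1 : pvTrial max_divisor k 2 <;> by_cases h2 : max_divisor < k <;>
    simp [h1, h2]

-- ===== VERDICT (by name: the statement is the Claim_ definition above) =====
theorem get_non_multiples_spec : Claim_equal_get_non_multiples := by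
  intro n max_divisor _
  unfold Spec_get_non_multiples get_non_multiples get_non_multiples_alt
  rw [pvStepB_eq, PySem.List.foldl_append_if_eq_filter, PySem.List.foldl_append_if_eq_filter,
    List.nil_append, List.nil_append]
  apply List.filter_congr
  intro k hk
  rw [PySem.List.mem_pyRange_one] at hk
  exact pvPred_eq n max_divisor k (by omega) (by omega)
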